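-- pv_equiv track=rewrite | github.com/matych0/lecture_11 | searching.py | pattern_search
-- ===== SOURCE A (Python) =====
-- def pattern_search(sequence, pattern):
--     pos = set()
--     idx = 0
--     while idx < len(sequence) - len(pattern):
--         index = 0
--         while index < len(pattern):
--             if sequence[idx + index] == pattern[index]:
--                 index = index +1
--             else:
--                 break
--         else:
--             pos.add(idx)
--         idx = idx + 1
--     return pos
-- ===== SOURCE B (Python) =====
-- def pattern_search(sequence, pattern):
--     # candidate-filtering search: one pass per pattern index, pruning surviving start positions
--     candidates = list(range(len(sequence) - len(pattern)))
--     for k, x in enumerate(pattern):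
--         candidates = [p for p in candidates if sequence[p + k] == x]
--         if not candidates:
--             break
--     return set(candidates)
-- ===== Notes on version B (the rewrite author's own statement) =====
-- stated objective: alternative
-- what changed: B interchanges the loops: instead of A's per-position inner scan over the whole pattern, B maintains a shrinking list of surviving candidate start positions and makes one filtering pass per pattern index (stopping early when no candidate survives), a column-wise traversal with a different maintained data structure.
import Mathlib
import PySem

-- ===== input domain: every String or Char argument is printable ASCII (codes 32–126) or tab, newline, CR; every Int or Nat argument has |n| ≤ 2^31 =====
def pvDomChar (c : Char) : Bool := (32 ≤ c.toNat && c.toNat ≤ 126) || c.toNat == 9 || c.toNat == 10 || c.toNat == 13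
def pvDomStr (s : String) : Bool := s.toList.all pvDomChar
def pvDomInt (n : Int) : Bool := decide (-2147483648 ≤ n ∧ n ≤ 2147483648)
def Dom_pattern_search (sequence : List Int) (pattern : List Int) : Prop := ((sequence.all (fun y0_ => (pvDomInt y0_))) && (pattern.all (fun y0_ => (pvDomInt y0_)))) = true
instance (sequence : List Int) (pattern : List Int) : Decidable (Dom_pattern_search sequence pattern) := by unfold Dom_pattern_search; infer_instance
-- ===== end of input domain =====

-- B interchanges A's loops: instead of scanning the whole pattern at each start position, it keeps a
-- shrinking list of surviving candidate positions and filters it once per pattern index (alternative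
-- decomposition; same worst-case cost).

-- ===== PORT A =====
-- inner 'while index < len(pattern)' loop; returns true iff the loop ran to completion (Python's while/else fired)
def psInner (sequence : List Int) (pattern : List Int) (idx : Nat) (index : Nat) : Bool :=
  if index < pattern.length then
    if PySem.List.pyGetD sequence ((idx : Int) + (index : Int)) 0
         == PySem.List.pyGetD pattern ((index : Int)) 0 then
      psInner sequence pattern idx (index + 1)
    else
      false
  else
    true
termination_by pattern.length - index

-- outer 'while idx < len(sequence) - len(pattern)' loop carrying the set 'pos'
def psOuter (sequence : List Int) (pattern : List Int) (idx : Nat) (pos : PySem.Set Int) : PySem.Set Int :=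
  if h : (idx : Int) < (sequence.length : Int) - (pattern.length : Int) then
    psOuter sequence pattern (idx + 1)
      (if psInner sequence pattern idx 0 then PySem.Set.add pos (idx : Int) else pos)
  else
    pos
termination_by sequence.length - pattern.length - idx
decreasing_by omega

def pattern_search (sequence : List Int) (pattern : List Int) : List Int :=
  psOuter sequence pattern 0 PySem.Set.empty

-- ===== PORT B =====
-- 'for k, x in enumerate(pattern): candidates = [p for p in candidates if sequence[p+k] == x]; if not candidates: break'
def psRounds (sequence : List Int) (k : Nat) (pats : List Int) (cands : List Int) : List Int :=
  match pats with
  | [] => cands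
  | x :: rest =>
      let c' := cands.filter (fun p => PySem.List.pyGetD sequence (p + (k : Int)) 0 == x)
      if c' = [] then c' else psRounds sequence (k + 1) rest c'

def pattern_search_alt (sequence : List Int) (pattern : List Int) : List Int :=
  PySem.Set.ofList
    (psRounds sequence 0 pattern
      (PySem.List.pyRange 0 ((sequence.length : Int) - (pattern.length : Int)) 1))

-- ===== PRECONDITION & SPEC =====
def Spec_pattern_search (sequence : List Int) (pattern : List Int) (out : List Int) : Prop := out = pattern_search_alt sequence pattern
instance (sequence : List Int) (pattern : List Int) (out : List Int) : Decidable (Spec_pattern_search sequence pattern out) := by unfold Spec_pattern_search; infer_instance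

-- ===== CLAIM (what is proved, stated in full; the proofs are below) =====
def Claim_equal_pattern_search : Prop := ∀ (sequence : List Int) (pattern : List Int), Dom_pattern_search sequence pattern → Spec_pattern_search sequence pattern (pattern_search sequence pattern)

-- ===== LEMMAS AND PROOFS =====

-- the inner loop started at 'index' decides equality of the rest of the window with the rest of the pattern
lemma psInner_eq (sequence pattern : List Int) (idx : Nat)
    (hidx : idx + pattern.length ≤ sequence.length) :
    ∀ index, index ≤ pattern.length →
      psInner sequence pattern idx index
        = decide (((sequence.drop (idx + index)).take (pattern.length - index)) = pattern.drop index) := by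
  intro index hle
  induction hk : pattern.length - index generalizing index with
  | zero =>
    have hi : index = pattern.length := by omega
    unfold psInner
    simp [hi, List.drop_length]
  | succ k ih =>
    have hlt : index < pattern.length := by omega
    have hs : idx + index < sequence.length := by omega
    unfold psInner
    rw [if_pos hlt]
    have e1 : PySem.List.pyGetD sequence ((idx : Int) + (index : Int)) 0 = sequence[idx + index] := by
      rw [show ((idx : Int) + (index : Int)) = ((idx + index : Nat) : Int) by push_cast; ring]
      rw [PySem.List.pyGetD_natCast, List.getD_eq_getElem _ _ hs]
    have e2 : PySem.List.pyGetD pattern ((index : Int)) 0 = pattern[index] := by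
      rw [PySem.List.pyGetD_natCast, List.getD_eq_getElem _ _ hlt]
    rw [e1, e2]
    have d1 : sequence.drop (idx + index) = sequence[idx + index] :: sequence.drop (idx + index + 1) :=
      List.drop_eq_getElem_cons hs
    have d2 : pattern.drop index = pattern[index] :: pattern.drop (index + 1) :=
      List.drop_eq_getElem_cons hlt
    rw [d1, d2, List.take_succ_cons]
    by_cases hh : sequence[idx + index] = pattern[index]
    · rw [if_pos (by simpa using hh)]
      rw [ih (index + 1) (by omega) (by omega)]
      rw [show idx + (index + 1) = idx + index + 1 by omega]
      simp only [hh]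
      simp only [List.cons.injEq, true_and]
    · rw [if_neg (by simpa using hh)]
      exact (decide_eq_false (fun hc => hh (List.cons_eq_cons.mp hc).1)).symm

-- the outer loop appends, in increasing order, exactly the matching positions ≥ idx
lemma psOuter_eq (sequence pattern : List Int) :
    ∀ (idx : Nat) (acc : List Int), (∀ x ∈ acc, x < (idx : Int)) →
      psOuter sequence pattern idx acc
        = acc ++ (PySem.List.pyRange (idx : Int) ((sequence.length : Int) - (pattern.length : Int)) 1).filter
            (fun i => ((sequence.drop i.toNat).take pattern.length) == pattern) := by
  intro idx acc hacc
  induction hk : sequence.length - pattern.length - idx generalizing idx acc with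
  | zero =>
    have hc : ¬ ((idx : Int) < (sequence.length : Int) - (pattern.length : Int)) := by omega
    unfold psOuter
    rw [dif_neg hc, PySem.List.pyRange_one_eq_nil (by omega)]
    simp
  | succ k ih =>
    have hc : (idx : Int) < (sequence.length : Int) - (pattern.length : Int) := by omega
    have hidx : idx + pattern.length ≤ sequence.length := by omega
    unfold psOuter
    rw [dif_pos hc, PySem.List.pyRange_one_cons hc, List.filter_cons]
    have hpred : (((sequence.drop ((idx : Int)).toNat).take pattern.length) == pattern)
        = psInner sequence pattern idx 0 := by
      rw [psInner_eq sequence pattern idx hidx 0 (by omega)]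
      simp only [Int.toNat_natCast, Nat.sub_zero, List.drop_zero, Nat.add_zero,
        Bool.beq_eq_decide_eq]
      exact decide_eq_decide.mpr Iff.rfl
    rw [hpred]
    have hcast : ((idx : Int) + 1) = (((idx + 1 : Nat)) : Int) := by push_cast; ring
    cases hb : psInner sequence pattern idx 0 with
    | true =>
      rw [if_pos rfl]
      have hnm : (idx : Int) ∉ acc := fun hm => absurd (hacc _ hm) (by simp)
      rw [PySem.Set.add_of_not_mem hnm, hcast,
        ih (idx + 1) (acc ++ [(idx : Int)])
          (by intro x hx; rcases List.mem_append.mp hx with h1 | h1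
              · exact lt_trans (hacc _ h1) (by push_cast; omega)
              · simp at h1; subst h1; push_cast; omega)
          (by omega)]
      simp
    | false =>
      rw [if_neg (by simp)]
      rw [hcast, ih (idx + 1) acc
        (fun x hx => lt_trans (hacc _ hx) (by push_cast; omega)) (by omega)]
      simp

-- B's candidate-filtering rounds compute one combined filter: a position survives all rounds
-- iff the window starting k places in matches the remaining pattern
lemma psRounds_eq (sequence : List Int) :
    ∀ (pats : List Int) (k : Nat) (cands : List Int),
      (∀ p ∈ cands, ∃ q : Nat, p = (q : Int) ∧ q + k + pats.length ≤ sequence.length) →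
      psRounds sequence k pats cands
        = cands.filter (fun p => ((sequence.drop (p.toNat + k)).take pats.length) == pats) := by
  intro pats
  induction pats with
  | nil =>
    intro k cands _
    simp [psRounds]
  | cons x rest ih =>
    intro k cands hinv
    show (if cands.filter (fun p => PySem.List.pyGetD sequence (p + (k : Int)) 0 == x) = []
          then cands.filter (fun p => PySem.List.pyGetD sequence (p + (k : Int)) 0 == x)
          else psRounds sequence (k + 1) rest
            (cands.filter (fun p => PySem.List.pyGetD sequence (p + (k : Int)) 0 == x))) = _
    have hinv' : ∀ p ∈ cands.filter (fun p => PySem.List.pyGetD sequence (p + (k : Int)) 0 == x),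
        ∃ q : Nat, p = (q : Int) ∧ q + (k + 1) + rest.length ≤ sequence.length := by
      intro p hp
      obtain ⟨q, hq, hb⟩ := hinv p (List.mem_of_mem_filter hp)
      exact ⟨q, hq, by simp at hb ⊢; omega⟩
    have hstep : psRounds sequence (k + 1) rest
          (cands.filter (fun p => PySem.List.pyGetD sequence (p + (k : Int)) 0 == x))
        = (cands.filter (fun p => PySem.List.pyGetD sequence (p + (k : Int)) 0 == x)).filter
            (fun p => ((sequence.drop (p.toNat + (k + 1))).take rest.length) == rest) :=
      ih (k + 1) _ hinv'
    have hcomb : (cands.filter (fun p => PySem.List.pyGetD sequence (p + (k : Int)) 0 == x)).filter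
            (fun p => ((sequence.drop (p.toNat + (k + 1))).take rest.length) == rest)
        = cands.filter (fun p => ((sequence.drop (p.toNat + k)).take (x :: rest).length) == x :: rest) := by
      rw [List.filter_filter]
      refine List.filter_congr ?_
      intro p hp
      obtain ⟨q, hq, hb⟩ := hinv p hp
      subst hq
      have hs : q + k < sequence.length := by simp at hb; omega
      have e1 : PySem.List.pyGetD sequence ((q : Int) + (k : Int)) 0 = sequence[q + k] := by
        rw [show ((q : Int) + (k : Int)) = ((q + k : Nat) : Int) by push_cast; ring]
        rw [PySem.List.pyGetD_natCast, List.getD_eq_getElem _ _ hs]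
      have d1 : sequence.drop (q + k) = sequence[q + k] :: sequence.drop (q + k + 1) :=
        List.drop_eq_getElem_cons hs
      simp only [Int.toNat_natCast, e1, List.length_cons]
      rw [d1, List.take_succ_cons, show q + k + 1 = q + (k + 1) by omega]
      simp only [Bool.beq_eq_decide_eq, List.cons.injEq]
      rw [Bool.and_comm]
      simp
    by_cases hn : cands.filter (fun p => PySem.List.pyGetD sequence (p + (k : Int)) 0 == x) = []
    · rw [if_pos hn, ← hcomb, hn]
      simp
    · rw [if_neg hn, hstep, hcomb]

-- ===== VERDICT (by name: the statement is the Claim_ definition above) =====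
theorem pattern_search_spec : Claim_equal_pattern_search := by
  intro sequence pattern _
  unfold Spec_pattern_search pattern_search pattern_search_alt
  have hA : psOuter sequence pattern 0 PySem.Set.empty
      = (PySem.List.pyRange 0 ((sequence.length : Int) - (pattern.length : Int)) 1).filter
          (fun i => ((sequence.drop i.toNat).take pattern.length) == pattern) := by
    have := psOuter_eq sequence pattern 0 PySem.Set.empty (by intro x hx; simp [PySem.Set.empty] at hx)
    simpa [PySem.Set.empty] using this
  have hinv : ∀ p ∈ PySem.List.pyRange 0 ((sequence.length : Int) - (pattern.length : Int)) 1,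
      ∃ q : Nat, p = (q : Int) ∧ q + 0 + pattern.length ≤ sequence.length := by
    intro p hp
    rw [PySem.List.mem_pyRange_one] at hp
    refine ⟨p.toNat, by omega, by omega⟩
  have hB : psRounds sequence 0 pattern
        (PySem.List.pyRange 0 ((sequence.length : Int) - (pattern.length : Int)) 1)
      = (PySem.List.pyRange 0 ((sequence.length : Int) - (pattern.length : Int)) 1).filter
          (fun i => ((sequence.drop i.toNat).take pattern.length) == pattern) := by
    rw [psRounds_eq sequence pattern 0 _ hinv]
    simp
  rw [hA, hB, PySem.Set.ofList_eq_self_of_nodup]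
  exact (PySem.List.nodup_pyRange_one 0 _).filter _
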